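-- pv_equiv track=rewrite | github.com/LaenNotTaken/PrUnUPTIndex | PrUn_Index.py | transpose_blocks
-- ===== SOURCE A (Python) =====
-- def transpose_blocks(company_blocks, n=3):
--     transposed_lines = []
--     for i in range(0, len(company_blocks), n):
--         blocks = company_blocks[i: i + n]
--         block_lines = [block.split("\n") for block in blocks]
--         max_lines = max(len(bl) for bl in block_lines)
--
--         for j in range(max_lines):
--             line = "   ".join(
--                 block_lines[k][j] if j < len(block_lines[k]) else "".ljust(37)
--                 for k in range(len(blocks))
--             )
--             transposed_lines.append(line)
--
--     return transposed_lines
-- ===== SOURCE B (Python) =====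
-- def transpose_blocks(company_blocks, n=3):
--     out = []
--     for i in range(0, len(company_blocks), n):
--         rows = []      # one entry per output row: the list of cells accumulated so far
--         depth = 0      # number of blocks of this group merged already
--         for block in company_blocks[i:i + n]:
--             lines = block.split("\n")
--             for j in range(len(lines)):
--                 if j < len(rows):
--                     rows[j].append(lines[j])
--                 else:
--                     rows.append([" " * 37] * depth + [lines[j]])
--             for r in rows[len(lines):]:
--                 r.append(" " * 37)
--             depth += 1
--         for r in rows:
--             out.append("   ".join(r))
--     return out
-- ===== Notes on version B (the rewrite author's own statement) =====
-- stated objective: alternative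
-- what changed: Instead of computing the group's max line count and indexing every block per output row, B folds over the blocks of a group one at a time, merging each block's lines into an accumulated row list and maintaining a growing filler string for rows the earlier blocks did not reach; no max-over-group or per-row scan of all blocks exists in B.
import Mathlib
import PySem

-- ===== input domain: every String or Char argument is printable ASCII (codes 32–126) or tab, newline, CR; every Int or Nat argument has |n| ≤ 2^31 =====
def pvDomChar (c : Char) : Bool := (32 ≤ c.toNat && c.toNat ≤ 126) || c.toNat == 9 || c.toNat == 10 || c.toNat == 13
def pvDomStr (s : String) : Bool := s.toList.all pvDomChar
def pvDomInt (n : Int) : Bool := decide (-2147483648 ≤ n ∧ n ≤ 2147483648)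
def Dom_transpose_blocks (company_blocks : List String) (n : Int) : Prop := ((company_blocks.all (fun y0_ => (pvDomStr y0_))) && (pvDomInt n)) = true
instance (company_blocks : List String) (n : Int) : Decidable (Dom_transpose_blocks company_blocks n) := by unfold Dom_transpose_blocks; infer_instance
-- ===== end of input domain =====

-- B merges each block of a group into accumulated per-row cell lists (joined once at the end)
-- instead of A's max-line count plus per-row indexing over every block (alternative
-- decomposition, same cost).

-- The 37-space filler: A writes it as "".ljust(37), B as " " * 37 — the same string constant.
def pvPad37 : String := "                                     "

-- ===== PORT A =====
def transpose_blocks (company_blocks : List String) (n : Int) : List String :=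
  (PySem.List.pyRange 0 company_blocks.length n).foldl (fun transposed_lines i =>
    let blocks := PySem.List.slice company_blocks (some i) (some (i + n))
    let block_lines := blocks.map (fun b => (PySem.Str.split? b "\n").getD [])  -- sep "\n" ≠ "": split? is always `some`
    let max_lines := ((PySem.List.max? (block_lines.map List.length) (fun x => x)).getD 0)  -- blocks ≠ [] inside the loop: max? is always `some`
    transposed_lines ++ (PySem.List.pyRange 0 (max_lines : Int) 1).map (fun j =>
      PySem.Str.join "   " ((PySem.List.pyRange 0 (blocks.length : Int) 1).map (fun k =>
        let bl := PySem.List.pyGetD block_lines k []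
        if j < (bl.length : Int) then PySem.List.pyGetD bl j "" else pvPad37)))) []

-- ===== PORT B =====
-- B's inner merge of one block into the accumulated per-row cell lists:
-- 'for j in range(len(lines)): …' then 'for r in rows[len(lines):]: r.append(" "*37)';
-- the mutations rows[j].append / rows.append / r.append are rendered functionally
-- (List.set / ++ [·]; the tail-slice mutation loop becomes take ++ map over the slice).
def pvMergeBlock (rows : List (List String)) (depth : Nat) (lines : List String) : List (List String) :=
  let rows1 := (List.range lines.length).foldl (fun rs j =>
    if j < rs.length then rs.set j (rs.getD j [] ++ [lines.getD j ""])
    else rs ++ [List.replicate depth pvPad37 ++ [lines.getD j ""]]) rows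
  rows1.take lines.length
    ++ (PySem.List.slice rows1 (some (lines.length : Int)) none).map (fun r => r ++ [pvPad37])

def transpose_blocks_alt (company_blocks : List String) (n : Int) : List String :=
  (PySem.List.pyRange 0 company_blocks.length n).foldl (fun out i =>
    let st := (PySem.List.slice company_blocks (some i) (some (i + n))).foldl
      (fun (st : List (List String) × Nat) block =>
        let lines := (PySem.Str.split? block "\n").getD []  -- sep "\n" ≠ "": split? is always `some`
        (pvMergeBlock st.1 st.2 lines, st.2 + 1)) ([], 0)
    out ++ st.1.map (fun r => PySem.Str.join "   " r)) []

-- ===== PRECONDITION & SPEC =====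
-- Pre_ excludes exactly n = 0, where Python's range(0, len, 0) raises ValueError (in both A and B).
def Pre_transpose_blocks (company_blocks : List String) (n : Int) : Prop := n ≠ 0
instance (company_blocks : List String) (n : Int) : Decidable (Pre_transpose_blocks company_blocks n) := by unfold Pre_transpose_blocks; infer_instance
def pvWitness_transpose_blocks : List String × Int := (["a\nbb", "c"], 2)

def Spec_transpose_blocks (company_blocks : List String) (n : Int) (out : List String) : Prop := out = transpose_blocks_alt company_blocks n
instance (company_blocks : List String) (n : Int) (out : List String) : Decidable (Spec_transpose_blocks company_blocks n out) := by unfold Spec_transpose_blocks; infer_instance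

-- ===== CLAIM (what is proved, stated in full; the proofs are below) =====
def Claim_equal_transpose_blocks : Prop := ∀ (company_blocks : List String) (n : Int), Dom_transpose_blocks company_blocks n → Pre_transpose_blocks company_blocks n → Spec_transpose_blocks company_blocks n (transpose_blocks company_blocks n)

-- ===== LEMMAS AND PROOFS =====

-- common description of one group's rows: max line count, one cell per block per row
def pvW (L : List (List String)) : Nat := (PySem.List.max? (L.map List.length) (fun x => x)).getD 0
def pvEntry (j : Nat) (bl : List String) : String := if j < bl.length then bl.getD j "" else pvPad37
def pvCellRows (L : List (List String)) : List (List String) :=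
  (List.range (pvW L)).map (fun j => L.map (pvEntry j))
def pvRows (L : List (List String)) : List String :=
  (List.range (pvW L)).map (fun j => PySem.Str.join "   " (L.map (pvEntry j)))

theorem pv_pvW_snoc (L : List (List String)) (c : List String) :
    pvW (L ++ [c]) = max (pvW L) c.length := by
  cases L with
  | nil => simp [pvW, PySem.List.max?]
  | cons x xs => simp [pvW, PySem.List.max?_id_cons, List.foldl_append]

theorem pv_pvW_isMax (L : List (List String)) : ∀ bl ∈ L, bl.length ≤ pvW L := by
  intro bl hbl
  cases L with
  | nil => simp at hbl
  | cons x xs =>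
    have h : PySem.List.max? ((x :: xs).map List.length) (fun y => y)
        = some (xs.foldl (fun a b => max a b.length) x.length) := by
      simp [PySem.List.max?_id_cons, List.foldl_map]
    have hb := PySem.List.max?_isMax h bl.length (List.mem_map_of_mem hbl)
    have hW : pvW (x :: xs) = xs.foldl (fun a b => max a b.length) x.length := by
      simp [pvW, PySem.List.max?_id_cons, List.foldl_map]
    rw [hW]
    simpa using hb

-- rows of a snoc group that go past every earlier block are all filler
theorem pv_map_entry_of_ge (L : List (List String)) (j : Nat) (h : pvW L ≤ j) :
    L.map (pvEntry j) = List.replicate L.length pvPad37 := by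
  apply List.ext_getElem (by simp)
  intro i h1 h2
  have hi : i < L.length := by simpa using h1
  have hb := pv_pvW_isMax L (L[i]) (List.getElem_mem hi)
  simp [pvEntry, show ¬ j < (L[i]).length by omega]

-- A's rows for one group are pvRows
theorem pv_A_group (L : List (List String)) :
    (PySem.List.pyRange 0 ((pvW L : Nat) : Int) 1).map (fun j =>
      PySem.Str.join "   " ((PySem.List.pyRange 0 (L.length : Int) 1).map (fun k =>
        let bl := PySem.List.pyGetD L k []
        if j < (bl.length : Int) then PySem.List.pyGetD bl j "" else pvPad37))) = pvRows L := by
  rw [PySem.List.pyRange_zero_natCast (pvW L), PySem.List.pyRange_zero_natCast L.length]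
  simp only [List.map_map]
  rw [pvRows]
  apply List.map_congr_left
  intro j _
  simp only [Function.comp_apply]
  congr 1
  apply List.ext_getElem (by simp)
  intro i h1 h2
  have hi : i < L.length := by simpa using h2
  simp only [List.getElem_map, List.getElem_range, Function.comp_apply]
  rw [PySem.List.pyGetD_natCast, List.getD_eq_getElem L [] hi]
  by_cases h : j < (L[i]).length
  · simp [pvEntry, h, PySem.List.pyGetD_natCast,
      show ((j:Int) < ((L[i]).length : Int)) by exact_mod_cast h]
  · simp [pvEntry, h, show ¬ ((j:Int) < ((L[i]).length : Int)) by exact_mod_cast h]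

-- the per-row cell lists read off a map over range
theorem pv_map_getD_range (rs : List (List String)) :
    (List.range rs.length).map (fun j => rs.getD j []) = rs := by
  apply List.ext_getElem (by simp)
  intro i h1 h2
  simp [List.getD, List.getElem?_eq_getElem h2]

-- characterisation of B's first inner loop (over the indices of `lines`)
theorem pv_fold1 (c : List String) (dep : Nat) (rows : List (List String)) (m : Nat) :
    (List.range m).foldl (fun rs j =>
        if j < rs.length then rs.set j (rs.getD j [] ++ [c.getD j ""])
        else rs ++ [List.replicate dep pvPad37 ++ [c.getD j ""]]) rows
    = (List.range (max rows.length m)).map (fun j =>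
        if j < rows.length then (if j < m then rows.getD j [] ++ [c.getD j ""] else rows.getD j [])
        else List.replicate dep pvPad37 ++ [c.getD j ""]) := by
  induction m with
  | zero =>
    simp only [List.range_zero, List.foldl_nil, Nat.max_zero]
    conv_lhs => rw [← pv_map_getD_range rows]
    apply List.map_congr_left
    intro j hj
    simp [List.mem_range.mp hj]
  | succ m ih =>
    rw [List.range_succ, List.foldl_append, ih, List.foldl_cons, List.foldl_nil]
    by_cases hlt : m < rows.length
    · have hmax : max rows.length m = rows.length := by omega
      have hmax' : max rows.length (m + 1) = rows.length := by omega
      rw [hmax, hmax']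
      have hmlen : m < ((List.range rows.length).map (fun j =>
          if j < rows.length then (if j < m then rows.getD j [] ++ [c.getD j ""] else rows.getD j [])
          else List.replicate dep pvPad37 ++ [c.getD j ""])).length := by simpa using hlt
      rw [if_pos hmlen]
      apply List.ext_getElem (by simp)
      intro i h1 h2
      have hi : i < rows.length := by simp at h2; omega
      simp only [List.getElem_set, List.getElem_map, List.getElem_range]
      by_cases hem : m = i
      · subst hem
        rw [List.getD_eq_getElem _ [] hmlen]
        simp [hlt, (show m < m + 1 by omega)]
      · simp only [if_neg hem]
        have heq : (i < m) = (i < m + 1) := by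
          by_cases h' : i < m
          · simp [h', (show i < m + 1 by omega)]
          · simp [h', (show ¬ i < m + 1 by omega)]
        simp [hi, heq]
    · have hle : rows.length ≤ m := by omega
      have hmax : max rows.length m = m := by omega
      have hmax' : max rows.length (m + 1) = m + 1 := by omega
      rw [hmax, hmax']
      have hmlen : ¬ m < ((List.range m).map (fun j =>
          if j < rows.length then (if j < m then rows.getD j [] ++ [c.getD j ""] else rows.getD j [])
          else List.replicate dep pvPad37 ++ [c.getD j ""])).length := by simp
      rw [if_neg hmlen]
      rw [List.range_succ, List.map_append, List.map_singleton]
      congr 1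
      · apply List.map_congr_left
        intro j hj
        have hjm : j < m := List.mem_range.mp hj
        by_cases hjr : j < rows.length
        · simp [hjr, show j < m + 1 by omega, hjm]
        · simp [hjr]
      · simp [(show ¬ m < rows.length by omega)]

-- splitting an in-place update of the tail of a mapped range into one map
theorem pv_take_map_drop {α : Type} (g : α → α) (f : Nat → α) (K m : Nat) (hm : m ≤ K) :
    ((List.range K).map f).take m ++ (((List.range K).map f).drop m).map g
      = (List.range K).map (fun j => if j < m then f j else g (f j)) := by
  apply List.ext_getElem (by
    simp only [List.length_append, List.length_take, List.length_map, List.length_range,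
      List.length_drop]
    omega)
  intro i h1 h2
  have hi : i < K := by simpa using h2
  simp only [List.getElem_map, List.getElem_range]
  by_cases him : i < m
  · rw [List.getElem_append_left (by
      simp only [List.length_take, List.length_map, List.length_range]; omega)]
    simp [List.getElem_take, him]
  · rw [List.getElem_append_right (by
      simp only [List.length_take, List.length_map, List.length_range]; omega)]
    simp only [List.getElem_map, List.length_take, List.length_map, List.length_range,
      List.getElem_drop, List.getElem_range]
    rw [show m + (i - min m K) = i by omega]
    simp [him]

-- B's merge of one more block extends the accumulated cell rows
theorem pv_mergeBlock (L : List (List String)) (c : List String) :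
    pvMergeBlock (pvCellRows L) L.length c = pvCellRows (L ++ [c]) := by
  have hlen : (pvCellRows L).length = pvW L := by simp [pvCellRows]
  have hget : ∀ j, j < pvW L → (pvCellRows L).getD j [] = L.map (pvEntry j) := by
    intro j hj
    rw [pvCellRows, List.getD_eq_getElem _ [] (by simpa using hj)]
    simp
  unfold pvMergeBlock
  dsimp only
  rw [pv_fold1, hlen]
  rw [PySem.List.slice_from _ (by positivity)]
  rw [show ((c.length : Int)).toNat = c.length from Int.toNat_natCast _]
  rw [pv_take_map_drop _ _ _ _ (by omega)]
  conv_rhs => rw [pvCellRows, pv_pvW_snoc]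
  apply List.map_congr_left
  intro i hmem
  have hi : i < max (pvW L) c.length := List.mem_range.mp hmem
  rw [List.map_append, List.map_singleton]
  by_cases him : i < c.length
  · rw [if_pos him]
    have hc : pvEntry i c = c.getD i "" := by simp [pvEntry, him]
    by_cases hiw : i < pvW L
    · rw [if_pos hiw, if_pos him, hget i hiw, hc]
    · rw [if_neg hiw, pv_map_entry_of_ge L i (by omega), hc]
  · have hiw : i < pvW L := by omega
    rw [if_neg him, if_pos hiw, if_neg him, hget i hiw]
    have hc : pvEntry i c = pvPad37 := by simp [pvEntry, him]
    rw [hc]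

-- B's inner fold over the blocks of a group produces the cell rows and the group size
theorem pv_B_fold (bs : List String) :
    bs.foldl (fun (st : List (List String) × Nat) block =>
        let lines := (PySem.Str.split? block "\n").getD []
        (pvMergeBlock st.1 st.2 lines, st.2 + 1)) ([], 0)
    = (pvCellRows (bs.map (fun b => (PySem.Str.split? b "\n").getD [])), bs.length) := by
  induction bs using List.reverseRecOn with
  | nil => simp [pvCellRows, pvW, PySem.List.max?]
  | append_singleton xs c ih =>
    rw [List.foldl_append, ih, List.foldl_cons, List.foldl_nil]
    refine Prod.ext ?_ (by simp)
    show pvMergeBlock _ xs.length _ = _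
    rw [show xs.length = (xs.map (fun b => (PySem.Str.split? b "\n").getD [])).length by simp]
    rw [pv_mergeBlock]
    simp [List.map_append]

-- ===== VERDICT (by name: the statement is the Claim_ definition above) =====
theorem transpose_blocks_spec : Claim_equal_transpose_blocks := by
  intro company_blocks n _ _
  unfold Spec_transpose_blocks transpose_blocks transpose_blocks_alt
  congr 1
  funext acc i
  simp only []
  rw [pv_B_fold]
  simp only []
  congr 1
  rw [show (pvCellRows ((PySem.List.slice company_blocks (some i) (some (i + n))).map
      (fun b => (PySem.Str.split? b "\n").getD []))).map (fun r => PySem.Str.join "   " r)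
      = pvRows ((PySem.List.slice company_blocks (some i) (some (i + n))).map
      (fun b => (PySem.Str.split? b "\n").getD [])) by
    simp [pvCellRows, pvRows, List.map_map, Function.comp_def]]
  have := pv_A_group ((PySem.List.slice company_blocks (some i) (some (i + n))).map
      (fun b => (PySem.Str.split? b "\n").getD []))
  simpa [pvW, List.length_map] using this
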